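-- pv_equiv track=rewrite | github.com/allenkong221/Pierian_Python_Projects | num007.py | numorder
-- ===== SOURCE A (Python) =====
-- def numorder(n):
-- 	first=False
-- 	second=False
-- 	third=False
-- 	for i in range(len(n)):
-- 		if n[i]==0:
-- 			first=True
-- 			for j in range(i+1,len(n)):
-- 				if n[j]==7:
-- 					break
-- 				elif n[j]==0:
-- 					second=True
-- 					for k in range(j+1,len(n)):
-- 						if n[k]==0:
-- 							break
-- 						elif n[k]==7:
-- 							third=True
-- 							break
-- 					break
--
-- 	return first and second and third
-- ===== SOURCE B (Python) =====
-- def numorder(n):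
--     # single linear pass: state = number of trailing zeros (capped at 2)
--     # among the "special" (0 or 7) elements seen so far
--     state = 0
--     for x in n:
--         if x == 0:
--             state = 2 if state >= 1 else 1
--         elif x == 7:
--             if state == 2:
--                 return True
--             state = 0
--     return False
-- ===== Notes on version B (the rewrite author's own statement) =====
-- stated objective: simpler
-- what changed: Replaced the triply-nested index scans and three accumulated flags by a single linear pass keeping one small state (count of trailing zeros among 0/7 elements, capped at 2) that detects the consecutive 0,0,7 pattern directly.
import Mathlib
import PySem

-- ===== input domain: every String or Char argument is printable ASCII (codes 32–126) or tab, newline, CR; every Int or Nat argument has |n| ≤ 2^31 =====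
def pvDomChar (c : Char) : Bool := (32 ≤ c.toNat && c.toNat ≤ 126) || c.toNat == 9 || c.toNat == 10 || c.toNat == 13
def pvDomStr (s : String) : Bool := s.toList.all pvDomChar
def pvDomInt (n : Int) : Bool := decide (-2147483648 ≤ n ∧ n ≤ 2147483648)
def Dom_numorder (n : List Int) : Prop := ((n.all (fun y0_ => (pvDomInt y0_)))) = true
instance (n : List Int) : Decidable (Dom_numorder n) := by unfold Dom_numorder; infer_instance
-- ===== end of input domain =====

-- B replaces A's triply-nested scans by one linear pass with a tiny state machine; proved to return the same Bool on every list.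

-- ===== PORT A =====
-- inner k-loop: scan after the second zero; break on 0, set third on 7
def kloopA (rest : List Int) (third : Bool) : Bool :=
  match rest with
  | [] => third
  | v :: r => if v = 0 then third else if v = 7 then true else kloopA r third

-- inner j-loop: scan after a zero; break on 7, on 0 set second and run the k-loop
def jloopA (rest : List Int) (second third : Bool) : Bool × Bool :=
  match rest with
  | [] => (second, third)
  | v :: r =>
    if v = 7 then (second, third)
    else if v = 0 then (true, kloopA r third)
    else jloopA r second third

-- outer i-loop over the list, accumulating the three flags
def iloopA (l : List Int) (first second third : Bool) : Bool :=
  match l with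
  | [] => first && second && third
  | v :: r =>
    if v = 0 then
      let p := jloopA r second third
      iloopA r true p.1 p.2
    else iloopA r first second third

def numorder (n : List Int) : Bool := iloopA n false false false

-- ===== PORT B =====
-- state = number of trailing zeros among the 0/7 elements seen so far, capped at 2
def bloop (l : List Int) (state : Nat) : Bool :=
  match l with
  | [] => false
  | x :: rest =>
    if x = 0 then bloop rest (if state ≥ 1 then 2 else 1)
    else if x = 7 then (if state = 2 then true else bloop rest 0)
    else bloop rest state

def numorder_alt (n : List Int) : Bool := bloop n 0

-- ===== PRECONDITION & SPEC =====
def Spec_numorder (n : List Int) (out : Bool) : Prop := out = numorder_alt n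
instance (n : List Int) (out : Bool) : Decidable (Spec_numorder n out) := by unfold Spec_numorder; infer_instance

-- ===== CLAIM (what is proved, stated in full; the proofs are below) =====
def Claim_equal_numorder : Prop := ∀ (n : List Int), Dom_numorder n → Spec_numorder n (numorder n)

-- ===== LEMMAS AND PROOFS =====

-- the "special" subsequence: the elements equal to 0 or 7, in order
def spec (l : List Int) : List Int := l.filter (fun x => x = 0 || x = 7)

-- predicates on the special subsequence
def p7 : List Int → Bool
  | [] => false
  | x :: _ => x = 7

def p07 : List Int → Bool
  | [] => false
  | x :: r => x = 0 && p7 r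

def has0 : List Int → Bool
  | [] => false
  | x :: r => x = 0 || has0 r

def has00' : List Int → Bool
  | [] => false
  | x :: r => (x = 0 && (match r with | [] => false | y :: _ => decide (y = 0))) || has00' r

def has007 : List Int → Bool
  | [] => false
  | x :: r => (x = 0 && p07 r) || has007 r

theorem kloopA_spec (r : List Int) (t : Bool) : kloopA r t = (t || p7 (spec r)) := by
  induction r with
  | nil => simp [kloopA, spec, p7]
  | cons v r ih =>
    by_cases h0 : v = 0
    · simp [kloopA, spec, h0, p7]
    · by_cases h7 : v = 7
      · simp [kloopA, spec, h0, h7, p7]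
      · simp [kloopA, spec, h0, h7, ih]

theorem jloopA_spec (r : List Int) (s t : Bool) :
    jloopA r s t = (s || (match spec r with | [] => false | y :: _ => decide (y = 0)),
                    t || p07 (spec r)) := by
  induction r with
  | nil => simp [jloopA, spec, p07]
  | cons v r ih =>
    by_cases h7 : v = 7
    · simp [jloopA, spec, h7, p07]
    · by_cases h0 : v = 0
      · simp [jloopA, spec, h0, h7, p07, kloopA_spec]
      · simp [jloopA, spec, h0, h7, ih]

theorem iloopA_spec (l : List Int) (f s t : Bool) :
    iloopA l f s t = ((f || has0 (spec l)) && (s || has00' (spec l)) && (t || has007 (spec l))) := by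
  induction l generalizing f s t with
  | nil => simp [iloopA, spec, has0, has00', has007]
  | cons v r ih =>
    by_cases h0 : v = 0
    · simp only [iloopA, h0, if_pos rfl, jloopA_spec, ih]
      simp [spec, has0, has00', has007, p07]
      cases s <;> cases t <;> cases hr : spec r with
      | nil => simp [has0, has00', has007, p7]
      | cons y ys => by_cases hy : y = 0 <;> simp [hy, p7] <;> ac_rfl
    · by_cases h7 : v = 7
      · simp [iloopA, h0, h7, ih, spec, has0, has00', has007]
      · simp [iloopA, h0, h7, ih, spec]

theorem bloop_spec (l : List Int) (st : Nat) :
    bloop l st = (has007 (spec l) || ((decide (st ≥ 1)) && p07 (spec l)) || ((decide (st = 2)) && p7 (spec l))) := by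
  induction l generalizing st with
  | nil => simp [bloop, spec, has007, p07, p7]
  | cons x r ih =>
    by_cases h0 : x = 0
    · by_cases h1 : st ≥ 1 <;>
        simp [bloop, h0, h1, ih, spec, has007, p07, p7] <;> ac_rfl
    · by_cases h7 : x = 7
      · by_cases h2 : st = 2 <;>
          simp [bloop, h0, h7, h2, ih, spec, has007, p07, p7]
      · simp [bloop, h0, h7, ih, spec]

theorem has007_imp (l : List Int) (h : has007 l = true) : has00' l = true ∧ has0 l = true := by
  induction l with
  | nil => simp [has007] at h
  | cons x r ih =>
    simp only [has007, Bool.or_eq_true, Bool.and_eq_true] at h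
    rcases h with ⟨hx, hp⟩ | h
    · cases r with
      | nil => simp [p07] at hp
      | cons y ys =>
        simp only [p07, Bool.and_eq_true, decide_eq_true_eq] at hp
        simp only [has00', has0, Bool.or_eq_true, Bool.and_eq_true]
        cases ys with
        | nil => simp [p7] at hp
        | cons z zs =>
          simp only [p7, decide_eq_true_eq] at hp
          exact ⟨Or.inl ⟨by simp [hx], by simp [hp.1]⟩, Or.inl (by simp [hx])⟩
    · rcases ih h with ⟨h1, h2⟩
      simp [has00', has0, h1, h2]

-- ===== VERDICT (by name: the statement is the Claim_ definition above) =====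
theorem numorder_spec : Claim_equal_numorder := by
  intro n _
  unfold Spec_numorder numorder numorder_alt
  rw [iloopA_spec, bloop_spec]
  simp only [Bool.false_or]
  by_cases h : has007 (spec n) = true
  · rcases has007_imp _ h with ⟨h1, h2⟩
    simp [h, h1, h2]
  · simp [Bool.not_eq_true] at h
    simp [h]
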